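-- pv_equiv track=rewrite | github.com/AndrewChan8/osuMPLinkParser | parseResults.py | calculateRankSum
-- ===== SOURCE A (Python) =====
-- def calculateRankSum(scores):
--     playerRankSum = {}
--     playerLowestRanks = {}
--     for score in scores:
--         for rank in range(len(scores[score])):
--             player = scores[score][rank][0]
--             if player not in playerRankSum:
--                 playerRankSum[player] = 0
--                 playerLowestRanks[player] = 0
--             playerRankSum[player] += rank + 1
--             if playerLowestRanks[player] < rank + 1:
--                 playerLowestRanks[player] = rank + 1
--     for player in playerRankSum:
--         playerRankSum[player] = playerRankSum[player] - playerLowestRanks[player]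
--
--     sortedRankSum = dict(sorted(playerRankSum.items(), key=lambda item: item[1]))
--
--     return sortedRankSum, playerLowestRanks
-- ===== SOURCE B (Python) =====
-- def calculateRankSum(scores):
--     # Collect each player's rank positions (rank+1) in first-appearance order,
--     # then reduce each list once: adjusted sum = sum - max, lowest = max.
--     ranks = {}
--     for lst in scores.values():
--         for i, entry in enumerate(lst):
--             ranks.setdefault(entry[0], []).append(i + 1)
--     adjusted = {}
--     lowest = {}
--     for player, rs in ranks.items():
--         worst = max(rs)
--         adjusted[player] = sum(rs) - worst
--         lowest[player] = worst
--     sortedRankSum = dict(sorted(adjusted.items(), key=lambda kv: kv[1]))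
--     return sortedRankSum, lowest
-- ===== Notes on version B (the rewrite author's own statement) =====
-- stated objective: alternative
-- what changed: Replaces A's online running-sum/running-max dict accumulation (plus an in-place subtraction pass over the dict) with a collect-then-reduce scheme: one pass groups each player's rank positions into a list keyed by player, then a single reduction pass computes per player max(ranks) and sum(ranks)-max(ranks) directly.
import Mathlib
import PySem

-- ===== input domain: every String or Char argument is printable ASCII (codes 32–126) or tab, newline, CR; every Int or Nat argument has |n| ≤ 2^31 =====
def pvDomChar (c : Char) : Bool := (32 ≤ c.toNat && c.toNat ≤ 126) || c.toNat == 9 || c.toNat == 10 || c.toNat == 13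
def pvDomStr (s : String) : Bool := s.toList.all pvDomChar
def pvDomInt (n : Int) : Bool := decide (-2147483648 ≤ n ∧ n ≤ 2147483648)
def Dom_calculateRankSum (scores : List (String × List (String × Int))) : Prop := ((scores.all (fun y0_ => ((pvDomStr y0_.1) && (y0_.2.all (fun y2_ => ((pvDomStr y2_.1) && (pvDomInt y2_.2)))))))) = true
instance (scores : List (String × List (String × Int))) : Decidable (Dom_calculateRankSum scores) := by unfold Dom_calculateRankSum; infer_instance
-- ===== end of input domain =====

-- B replaces A's online running-sum/running-max accumulation (plus an in-place subtraction pass)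
-- with a collect-then-reduce scheme: group rank positions per player, then one reduction pass.

-- ===== PORT A =====
-- 'for score in scores' with 'scores[score]' on a dict visits each (key, value) pair once;
-- 'for rank in range(len(xs))' with 'xs[rank][0]' is the enumerate traversal (indices always in range).
def pvAmain (scores : List (String × List (String × Int))) :
    PySem.Dict String Int × PySem.Dict String Int :=
  scores.foldl (fun (st : PySem.Dict String Int × PySem.Dict String Int) pr =>
    (PySem.List.enumerate pr.2 0).foldl (fun st ie =>
      let player := ie.2.1
      let st := if st.1.contains player then st
                else (st.1.insert player 0, st.2.insert player 0)
      (st.1.insert player (st.1.getD player 0 + (ie.1 + 1)),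
       if st.2.getD player 0 < ie.1 + 1 then st.2.insert player (ie.1 + 1) else st.2)) st)
    (PySem.Dict.empty, PySem.Dict.empty)

-- 'for player in playerRankSum: playerRankSum[player] -= playerLowestRanks[player]' (keys unchanged)
def pvAsub (st : PySem.Dict String Int × PySem.Dict String Int) : PySem.Dict String Int :=
  st.1.keys.foldl (fun d p => d.insert p (d.getD p 0 - st.2.getD p 0)) st.1

def calculateRankSum (scores : List (String × List (String × Int))) :
    (List (String × Int)) × (List (String × Int)) :=
  let st := pvAmain scores
  let s2 := pvAsub st
  ((PySem.Dict.ofList (PySem.List.sorted s2.items (fun it => it.2) false)).items, st.2.items)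

-- ===== PORT B =====
-- collect: rank positions (rank+1) per player, in first-appearance order
def pvBtable (scores : List (String × List (String × Int))) : PySem.Dict String (List Int) :=
  scores.foldl (fun (d : PySem.Dict String (List Int)) pr =>
    (PySem.List.enumerate pr.2 0).foldl (fun d ie => d.modify ie.2.1 [] (fun cur => cur ++ [ie.1 + 1])) d)
    PySem.Dict.empty

-- reduce: adjusted[p] = sum(rs) - max(rs); lowest[p] = max(rs)   (rs never empty, so max? is some)
def pvBreduce (items : List (String × List Int)) :
    PySem.Dict String Int × PySem.Dict String Int :=
  items.foldl (fun (dd : PySem.Dict String Int × PySem.Dict String Int) prs =>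
    (dd.1.insert prs.1 (prs.2.sum - (PySem.List.max? prs.2 (fun x => x)).getD 0),
     dd.2.insert prs.1 ((PySem.List.max? prs.2 (fun x => x)).getD 0)))
    (PySem.Dict.empty, PySem.Dict.empty)

def calculateRankSum_alt (scores : List (String × List (String × Int))) :
    (List (String × Int)) × (List (String × Int)) :=
  let t := pvBtable scores
  let dd := pvBreduce t.items
  ((PySem.Dict.ofList (PySem.List.sorted dd.1.items (fun it => it.2) false)).items, dd.2.items)

-- ===== PRECONDITION & SPEC =====
def Spec_calculateRankSum (scores : List (String × List (String × Int))) (out : (List (String × Int)) × (List (String × Int))) : Prop := out = calculateRankSum_alt scores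
instance (scores : List (String × List (String × Int))) (out : (List (String × Int)) × (List (String × Int))) : Decidable (Spec_calculateRankSum scores out) := by unfold Spec_calculateRankSum; infer_instance

-- ===== CLAIM (what is proved, stated in full; the proofs are below) =====
def Claim_equal_calculateRankSum : Prop := ∀ (scores : List (String × List (String × Int))), Dom_calculateRankSum scores → Spec_calculateRankSum scores (calculateRankSum scores)

-- ===== LEMMAS AND PROOFS =====

-- the flattened event stream: one (player, rank+1) event per score entry, in traversal order
def pvEv (scores : List (String × List (String × Int))) : List (String × Int) :=
  scores.flatMap (fun pr => (PySem.List.enumerate pr.2 0).map (fun ie => (ie.2.1, ie.1 + 1)))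

-- the rank positions recorded for player p, in order
def pvRks (E : List (String × Int)) (p : String) : List Int :=
  (E.filter (fun e => e.1 == p)).map (fun e => e.2)

-- A's inner-loop body as a function of a single event
def pvStepA (st : PySem.Dict String Int × PySem.Dict String Int) (e : String × Int) :
    PySem.Dict String Int × PySem.Dict String Int :=
  let st := if st.1.contains e.1 then st else (st.1.insert e.1 0, st.2.insert e.1 0)
  (st.1.insert e.1 (st.1.getD e.1 0 + e.2),
   if st.2.getD e.1 0 < e.2 then st.2.insert e.1 e.2 else st.2)

theorem pv_foldl_flatMap {α β σ : Type} (l : List α) (g : α → List β) (f : σ → β → σ) (init : σ) :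
    (l.flatMap g).foldl f init = l.foldl (fun st x => (g x).foldl f st) init := by
  induction l generalizing init with
  | nil => rfl
  | cons a l ih => simp [List.foldl_append, ih]

theorem pv_ev_pos (scores : List (String × List (String × Int))) :
    ∀ e ∈ pvEv scores, 1 ≤ e.2 := by
  intro e he
  simp only [pvEv, List.mem_flatMap, List.mem_map] at he
  obtain ⟨pr, _, ie, hie, rfl⟩ := he
  rw [PySem.List.mem_enumerate_iff] at hie
  obtain ⟨k, hk, rfl⟩ := hie
  simp

-- invariant of A's main loop over the event stream
theorem pvA_char (E : List (String × Int)) :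
    ∀ (s l : PySem.Dict String Int),
      (∀ e ∈ E, 1 ≤ e.2) →
      (∀ q, s.contains q = l.contains q) → s.keys.Nodup → l.keys.Nodup →
      (E.foldl pvStepA (s, l)).1.keys = PySem.Set.update s.keys (E.map (fun e => e.1)) ∧
      (E.foldl pvStepA (s, l)).2.keys = PySem.Set.update l.keys (E.map (fun e => e.1)) ∧
      (∀ p, (E.foldl pvStepA (s, l)).1.getD p 0 = s.getD p 0 + (pvRks E p).sum) ∧
      (∀ p, (E.foldl pvStepA (s, l)).2.getD p 0 = (pvRks E p).foldl max (l.getD p 0)) ∧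
      (E.foldl pvStepA (s, l)).1.keys.Nodup ∧
      (E.foldl pvStepA (s, l)).2.keys.Nodup := by
  induction E with
  | nil =>
    intro s l _ _ hs hl
    refine ⟨by simp [PySem.Set.update_nil], by simp [PySem.Set.update_nil],
            fun q => by simp [pvRks], fun q => by simp [pvRks], hs, hl⟩
  | cons e tl ih =>
    intro s l hpos hc hs hl
    obtain ⟨p, r⟩ := e
    have hr : (1 : Int) ≤ r := hpos (p, r) (by simp)
    have hposT : ∀ e ∈ tl, (1 : Int) ≤ e.2 := fun e he => hpos e (List.mem_cons_of_mem _ he)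
    have hstep : pvStepA (s, l) (p, r)
        = (s.insert p (s.getD p 0 + r), if l.getD p 0 < r then l.insert p r else l) := by
      cases hcb : s.contains p with
      | false =>
        have hclb : l.contains p = false := by rw [← hc p]; exact hcb
        have hs0 : s.getD p 0 = 0 := PySem.Dict.getD_of_not_contains s 0 hcb
        have hl0 : l.getD p 0 = 0 := PySem.Dict.getD_of_not_contains l 0 hclb
        have hlt : l.getD p 0 < r := by omega
        have h0r : (0 : Int) < r := by omega
        simp [pvStepA, hcb, PySem.Dict.getD_insert_self, PySem.Dict.insert_insert_self,
              hs0, hl0, h0r]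
      | true => simp [pvStepA, hcb]
    rw [List.foldl_cons, hstep]
    set s1 := s.insert p (s.getD p 0 + r) with hs1def
    set l1 := (if l.getD p 0 < r then l.insert p r else l) with hl1def
    have hclp_of_ge : ¬ l.getD p 0 < r → l.contains p = true := by
      intro hge
      cases hcb : l.contains p with
      | true => rfl
      | false =>
        exfalso
        have h0 := PySem.Dict.getD_of_not_contains l 0 hcb
        omega
    have h1 : ∀ q, s1.getD q 0 = if q = p then s.getD p 0 + r else s.getD q 0 := fun q => by
      rw [hs1def]; exact PySem.Dict.getD_insert s p q _ 0
    have h2 : ∀ q, l1.getD q 0 = if q = p then max (l.getD p 0) r else l.getD q 0 := by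
      intro q
      rw [hl1def]
      by_cases hlt : l.getD p 0 < r
      · rw [if_pos hlt, PySem.Dict.getD_insert l p q r 0]
        by_cases hqp : q = p
        · subst hqp; rw [if_pos rfl, if_pos rfl]; omega
        · rw [if_neg hqp, if_neg hqp]
      · rw [if_neg hlt]
        by_cases hqp : q = p
        · subst hqp; rw [if_pos rfl]; omega
        · rw [if_neg hqp]
    have h3 : s1.keys = PySem.Set.add s.keys p := by
      rw [hs1def]
      cases hcb : s.contains p with
      | true =>
        rw [PySem.Dict.keys_insert_of_contains s _ hcb,
            PySem.Set.add_of_mem ((PySem.Dict.contains_iff_mem_keys s p).mp hcb)]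
      | false =>
        rw [PySem.Dict.keys_insert_of_not_contains s _ hcb,
            PySem.Set.add_of_not_mem
              (fun hm => absurd ((PySem.Dict.contains_iff_mem_keys s p).mpr hm) (by simp [hcb]))]
    have h4 : l1.keys = PySem.Set.add l.keys p := by
      rw [hl1def]
      by_cases hlt : l.getD p 0 < r
      · rw [if_pos hlt]
        cases hcb : l.contains p with
        | true =>
          rw [PySem.Dict.keys_insert_of_contains l _ hcb,
              PySem.Set.add_of_mem ((PySem.Dict.contains_iff_mem_keys l p).mp hcb)]
        | false =>
          rw [PySem.Dict.keys_insert_of_not_contains l _ hcb,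
              PySem.Set.add_of_not_mem
                (fun hm => absurd ((PySem.Dict.contains_iff_mem_keys l p).mpr hm) (by simp [hcb]))]
      · rw [if_neg hlt,
            PySem.Set.add_of_mem ((PySem.Dict.contains_iff_mem_keys l p).mp (hclp_of_ge hlt))]
    have h5 : ∀ q, s1.contains q = l1.contains q := by
      intro q
      rw [hs1def, hl1def, PySem.Dict.contains_insert s p q _]
      by_cases hlt : l.getD p 0 < r
      · rw [if_pos hlt, PySem.Dict.contains_insert l p q r, hc q]
      · rw [if_neg hlt]
        cases hqp : (q == p) with
        | false => rw [Bool.false_or, hc q]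
        | true =>
          have hq : q = p := eq_of_beq hqp
          subst hq
          simp [hclp_of_ge hlt]
    have h6 : s1.keys.Nodup := by rw [h3]; exact PySem.Set.nodup_add s.keys p hs
    have h7 : l1.keys.Nodup := by rw [h4]; exact PySem.Set.nodup_add l.keys p hl
    obtain ⟨k1, k2, g1, g2, n1, n2⟩ := ih s1 l1 hposT h5 h6 h7
    refine ⟨?_, ?_, ?_, ?_, n1, n2⟩
    · rw [k1, h3, List.map_cons, PySem.Set.update_cons]
    · rw [k2, h4, List.map_cons, PySem.Set.update_cons]
    · intro q
      rw [g1 q, h1 q]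
      by_cases hqp : q = p
      · subst hqp
        have hfil : pvRks ((q, r) :: tl) q = r :: pvRks tl q := by
          simp [pvRks]
        rw [hfil, if_pos rfl, List.sum_cons]
        ring
      · have hb : ((p, r).1 == q) = false := beq_eq_false_iff_ne.mpr (fun h => hqp h.symm)
        have hfil : pvRks ((p, r) :: tl) q = pvRks tl q := by
          simp [pvRks, hb]
        rw [hfil, if_neg hqp]
    · intro q
      rw [g2 q, h2 q]
      by_cases hqp : q = p
      · subst hqp
        have hfil : pvRks ((q, r) :: tl) q = r :: pvRks tl q := by
          simp [pvRks]
        rw [hfil, if_pos rfl, List.foldl_cons]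
      · have hb : ((p, r).1 == q) = false := beq_eq_false_iff_ne.mpr (fun h => hqp h.symm)
        have hfil : pvRks ((p, r) :: tl) q = pvRks tl q := by
          simp [pvRks, hb]
        rw [hfil, if_neg hqp]

-- A's subtraction pass: keys unchanged, values decreased by the lowest-rank table
theorem pv_second (L : PySem.Dict String Int) (ks : List String) :
    ∀ (d : PySem.Dict String Int), ks.Nodup → (∀ q ∈ ks, d.contains q = true) →
      (ks.foldl (fun d q => d.insert q (d.getD q 0 - L.getD q 0)) d).keys = d.keys ∧
      (∀ q, (ks.foldl (fun d q => d.insert q (d.getD q 0 - L.getD q 0)) d).getD q 0 =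
        if q ∈ ks then d.getD q 0 - L.getD q 0 else d.getD q 0) := by
  induction ks with
  | nil => intro d _ _; exact ⟨rfl, fun q => by simp⟩
  | cons k ks ih =>
    intro d hnd hcont
    have hck : d.contains k = true := hcont k (by simp)
    have hnd' := List.nodup_cons.mp hnd
    have hcont' : ∀ q ∈ ks, (d.insert k (d.getD k 0 - L.getD k 0)).contains q = true := by
      intro q hq
      rw [PySem.Dict.contains_insert d k q _, hcont q (List.mem_cons_of_mem _ hq), Bool.or_true]
    obtain ⟨ik, ig⟩ := ih (d.insert k (d.getD k 0 - L.getD k 0)) hnd'.2 hcont'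
    constructor
    · rw [List.foldl_cons, ik, PySem.Dict.keys_insert_of_contains d _ hck]
    · intro q
      rw [List.foldl_cons, ig q]
      by_cases hqk : q = k
      · subst hqk
        rw [if_neg hnd'.1, PySem.Dict.getD_insert_self d q _ 0, if_pos (by simp)]
      · rw [PySem.Dict.getD_insert_of_ne d _ 0 hqk]
        simp [List.mem_cons, hqk]

-- max(rs) equals the running max from 0 when rs is nonempty with positive entries
theorem pv_max_eq (rs : List Int) (hne : rs ≠ []) (hpos : ∀ r ∈ rs, 1 ≤ r) :
    rs.foldl max 0 = (PySem.List.max? rs (fun x => x)).getD 0 := by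
  cases rs with
  | nil => exact absurd rfl hne
  | cons r0 rest =>
    rw [PySem.List.max?_id_cons]
    have h0 : max 0 r0 = r0 := by
      have := hpos r0 (by simp); omega
    simp [List.foldl_cons, h0]

theorem pv_main (scores : List (String × List (String × Int))) :
    calculateRankSum scores = calculateRankSum_alt scores := by
  have hposE := pv_ev_pos scores
  have hA : pvAmain scores = (pvEv scores).foldl pvStepA (PySem.Dict.empty, PySem.Dict.empty) := by
    unfold pvAmain pvEv
    rw [pv_foldl_flatMap]
    simp only [List.foldl_map]
    try rfl
  have hB : pvBtable scores =
      (pvEv scores).foldl (fun d e => d.modify e.1 [] (fun cur => cur ++ [e.2])) PySem.Dict.empty := by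
    unfold pvBtable pvEv
    rw [pv_foldl_flatMap]
    simp only [List.foldl_map]
    try rfl
  obtain ⟨hk1, hk2, hg1, hg2, hn1, hn2⟩ :=
    pvA_char (pvEv scores) PySem.Dict.empty PySem.Dict.empty hposE (fun _ => rfl)
      (by rw [PySem.Dict.keys_empty]; exact List.nodup_nil)
      (by rw [PySem.Dict.keys_empty]; exact List.nodup_nil)
  set F := (pvEv scores).foldl pvStepA (PySem.Dict.empty, PySem.Dict.empty)
  rw [PySem.Dict.keys_empty, PySem.Set.update_nil_left] at hk1 hk2
  have hS : ∀ p, F.1.getD p 0 = (pvRks (pvEv scores) p).sum := by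
    intro p; rw [hg1 p, PySem.Dict.getD_empty, zero_add]
  have hL : ∀ p, F.2.getD p 0 = (pvRks (pvEv scores) p).foldl max 0 := by
    intro p; rw [hg2 p, PySem.Dict.getD_empty]
  have hmem : ∀ p ∈ PySem.Set.ofList ((pvEv scores).map (fun e => e.1)),
      pvRks (pvEv scores) p ≠ [] ∧ ∀ r ∈ pvRks (pvEv scores) p, (1 : Int) ≤ r := by
    intro p hp
    rw [PySem.Set.mem_ofList] at hp
    obtain ⟨e, he, hep⟩ := List.mem_map.mp hp
    constructor
    · have hef : e ∈ (pvEv scores).filter (fun e' => e'.1 == p) := by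
        rw [List.mem_filter]
        exact ⟨he, by simp [hep]⟩
      have h2 : e.2 ∈ pvRks (pvEv scores) p := by
        simp only [pvRks, List.mem_map]
        exact ⟨e, hef, rfl⟩
      exact List.ne_nil_of_mem h2
    · intro r hrr
      simp only [pvRks, List.mem_map] at hrr
      obtain ⟨e', he', rfl⟩ := hrr
      exact hposE e' (List.mem_filter.mp he').1
  have hmx : ∀ p ∈ PySem.Set.ofList ((pvEv scores).map (fun e => e.1)),
      (pvRks (pvEv scores) p).foldl max 0
        = (PySem.List.max? (pvRks (pvEv scores) p) (fun x => x)).getD 0 :=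
    fun p hp => pv_max_eq _ (hmem p hp).1 (hmem p hp).2
  obtain ⟨hsk, hsg⟩ :=
    pv_second F.2 F.1.keys F.1 hn1 (fun q hq => (PySem.Dict.contains_iff_mem_keys F.1 q).mpr hq)
  have hGdef : pvAsub F = F.1.keys.foldl (fun d q => d.insert q (d.getD q 0 - F.2.getD q 0)) F.1 := rfl
  have hAitems : (pvAsub F).items =
      (PySem.Set.ofList ((pvEv scores).map (fun e => e.1))).map
        (fun q => (q, (pvRks (pvEv scores) q).sum
          - (PySem.List.max? (pvRks (pvEv scores) q) (fun x => x)).getD 0)) := by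
    rw [hGdef,
        PySem.Dict.items_eq_map_keys
          (F.1.keys.foldl (fun d q => d.insert q (d.getD q 0 - F.2.getD q 0)) F.1)
          (by rw [hsk]; exact hn1) 0,
        hsk, ← hk1]
    apply List.map_congr_left
    intro q hq
    rw [hsg q, if_pos hq, hS q, hL q, hmx q (by rw [← hk1]; exact hq)]
  have hAlow : F.2.items =
      (PySem.Set.ofList ((pvEv scores).map (fun e => e.1))).map
        (fun q => (q, (PySem.List.max? (pvRks (pvEv scores) q) (fun x => x)).getD 0)) := by
    rw [PySem.Dict.items_eq_map_keys F.2 hn2 0, hk2]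
    apply List.map_congr_left
    intro q hq
    rw [hL q, hmx q hq]
  have hTn : (pvBtable scores).keys.Nodup := by
    rw [hB]
    exact PySem.Dict.nodup_keys_foldl_modify_key (pvEv scores) (fun e => e.1) []
      (fun _ e => fun cur => cur ++ [e.2]) PySem.Dict.empty
      (by rw [PySem.Dict.keys_empty]; exact List.nodup_nil)
  have hTk : (pvBtable scores).keys = PySem.Set.ofList ((pvEv scores).map (fun e => e.1)) := by
    rw [hB]
    have h := PySem.Dict.keys_foldl_modify_key (pvEv scores) (fun e => e.1) ([] : List Int)
      (fun _ e => fun cur => cur ++ [e.2]) PySem.Dict.empty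
    rw [PySem.Dict.keys_empty, PySem.Set.update_nil_left] at h
    exact h
  have hTg : ∀ p, (pvBtable scores).getD p [] = pvRks (pvEv scores) p := by
    intro p
    rw [hB]
    have h := PySem.Dict.getD_foldl_modify_append (pvEv scores) PySem.Dict.empty p
    rw [PySem.Dict.getD_empty, List.nil_append] at h
    exact h
  have hTitems : (pvBtable scores).items =
      (PySem.Set.ofList ((pvEv scores).map (fun e => e.1))).map
        (fun q => (q, pvRks (pvEv scores) q)) := by
    rw [PySem.Dict.items_eq_map_keys (pvBtable scores) hTn [], hTk]
    exact List.map_congr_left (fun q _ => by rw [hTg q])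
  have hBr : pvBreduce (pvBtable scores).items =
      ((pvBtable scores).items.foldl
          (fun d prs => d.insert prs.1 (prs.2.sum - (PySem.List.max? prs.2 (fun x => x)).getD 0))
          PySem.Dict.empty,
       (pvBtable scores).items.foldl
          (fun d prs => d.insert prs.1 ((PySem.List.max? prs.2 (fun x => x)).getD 0))
          PySem.Dict.empty) := by
    unfold pvBreduce
    exact PySem.List.foldl_prod_mk
      (fun (d : PySem.Dict String Int) (prs : String × List Int) =>
        d.insert prs.1 (prs.2.sum - (PySem.List.max? prs.2 (fun x => x)).getD 0))
      (fun (d : PySem.Dict String Int) (prs : String × List Int) =>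
        d.insert prs.1 ((PySem.List.max? prs.2 (fun x => x)).getD 0))
      ((pvBtable scores).items) PySem.Dict.empty PySem.Dict.empty
  have hBr1 : (pvBreduce (pvBtable scores).items).1 =
      (pvBtable scores).items.foldl
        (fun d prs => d.insert prs.1 (prs.2.sum - (PySem.List.max? prs.2 (fun x => x)).getD 0))
        PySem.Dict.empty := by rw [hBr]
  have hBr2 : (pvBreduce (pvBtable scores).items).2 =
      (pvBtable scores).items.foldl
        (fun d prs => d.insert prs.1 ((PySem.List.max? prs.2 (fun x => x)).getD 0))
        PySem.Dict.empty := by rw [hBr]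
  have hfresh1 : ((pvBtable scores).items.foldl
      (fun d prs => d.insert prs.1 (prs.2.sum - (PySem.List.max? prs.2 (fun x => x)).getD 0))
      PySem.Dict.empty).items
      = (pvBtable scores).items.map
          (fun prs => (prs.1, prs.2.sum - (PySem.List.max? prs.2 (fun x => x)).getD 0)) := by
    exact PySem.Dict.items_foldl_insert_fresh ((pvBtable scores).items) (fun prs => prs.1)
      (fun prs => prs.2.sum - (PySem.List.max? prs.2 (fun x => x)).getD 0) PySem.Dict.empty
      (fun a _ => PySem.Dict.contains_empty a.1) hTn
  have hfresh2 : ((pvBtable scores).items.foldl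
      (fun d prs => d.insert prs.1 ((PySem.List.max? prs.2 (fun x => x)).getD 0))
      PySem.Dict.empty).items
      = (pvBtable scores).items.map
          (fun prs => (prs.1, (PySem.List.max? prs.2 (fun x => x)).getD 0)) := by
    exact PySem.Dict.items_foldl_insert_fresh ((pvBtable scores).items) (fun prs => prs.1)
      (fun prs => (PySem.List.max? prs.2 (fun x => x)).getD 0) PySem.Dict.empty
      (fun a _ => PySem.Dict.contains_empty a.1) hTn
  have hB1 : ((pvBtable scores).items.foldl
      (fun d prs => d.insert prs.1 (prs.2.sum - (PySem.List.max? prs.2 (fun x => x)).getD 0))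
      PySem.Dict.empty).items
      = (PySem.Set.ofList ((pvEv scores).map (fun e => e.1))).map
          (fun q => (q, (pvRks (pvEv scores) q).sum
            - (PySem.List.max? (pvRks (pvEv scores) q) (fun x => x)).getD 0)) := by
    rw [hfresh1, hTitems, List.map_map]
    rfl
  have hB2 : ((pvBtable scores).items.foldl
      (fun d prs => d.insert prs.1 ((PySem.List.max? prs.2 (fun x => x)).getD 0))
      PySem.Dict.empty).items
      = (PySem.Set.ofList ((pvEv scores).map (fun e => e.1))).map
          (fun q => (q, (PySem.List.max? (pvRks (pvEv scores) q) (fun x => x)).getD 0)) := by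
    rw [hfresh2, hTitems, List.map_map]
    rfl
  simp only [calculateRankSum, calculateRankSum_alt]
  rw [hA, hBr1, hBr2, hB1, hB2, hAitems, hAlow]

-- ===== VERDICT (by name: the statement is the Claim_ definition above) =====
theorem calculateRankSum_spec : Claim_equal_calculateRankSum := by
  intro scores _
  unfold Spec_calculateRankSum
  exact pv_main scores
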